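-- pv_equiv track=rewrite | github.com/thanmai59/BVRITHYDERABAD | CSE/Machine Learning Lab/sum_of_triplets.py | solution
-- ===== SOURCE A (Python) =====
-- def solution(n):
--     a_sum, b_sum, c_sum = [], [], []
--     for a in range(n):
--         for b in range(n):
--             for c in range(n):
--                 if isTriplet(a, b, c):
--                     a_sum.append(a)
--                     b_sum.append(b)
--                     c_sum.append(c)
--     return sum(a_sum) + sum(b_sum) + sum(c_sum)
--
-- def isTriplet(a, b, c):
--     return a ** 3 + b ** 2 == c ** 2
-- ===== SOURCE B (Python) =====
-- def solution(n):
--     # Index every square of c in range(n) by its value once, then for each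
--     # pair (a, b) look up the unique nonnegative root c whose square matches.
--     sq = {c * c: c for c in range(n)}
--     total = 0
--     for a in range(n):
--         a3 = a ** 3
--         for b in range(n):
--             c = sq.get(a3 + b * b)
--             if c is not None:
--                 total += a + b + c
--     return total
-- ===== Notes on version B (the rewrite author's own statement) =====
-- stated objective: faster
-- what changed: Replaced the cubic triple loop (and the three appended lists) by a precomputed square-to-root dictionary and a double loop over (a, b) that looks up the unique nonnegative c whose square matches, accumulating the sum directly.
import Mathlib
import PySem

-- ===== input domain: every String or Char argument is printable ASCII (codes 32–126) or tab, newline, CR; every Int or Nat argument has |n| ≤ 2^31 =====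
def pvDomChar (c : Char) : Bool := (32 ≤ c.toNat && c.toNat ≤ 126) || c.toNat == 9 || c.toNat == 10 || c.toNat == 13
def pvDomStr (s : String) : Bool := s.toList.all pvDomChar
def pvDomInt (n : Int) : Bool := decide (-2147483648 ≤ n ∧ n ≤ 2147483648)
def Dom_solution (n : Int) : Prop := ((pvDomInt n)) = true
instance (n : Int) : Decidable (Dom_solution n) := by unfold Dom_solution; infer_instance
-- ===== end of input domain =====

-- B replaces A's O(n^3) triple loop by a square->root dictionary plus a double loop (objective: faster, asymptotic).

-- ===== PORT A =====
def isTriplet (a b c : Int) : Bool := a ^ 3 + b ^ 2 == c ^ 2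

def solution (n : Int) : Int :=
  let st :=
    (PySem.List.pyRange 0 n 1).foldl (fun (st : List Int × List Int × List Int) a =>
      (PySem.List.pyRange 0 n 1).foldl (fun st b =>
        (PySem.List.pyRange 0 n 1).foldl (fun st c =>
          if isTriplet a b c then (st.1 ++ [a], st.2.1 ++ [b], st.2.2 ++ [c]) else st) st) st)
      ([], [], [])
  st.1.sum + st.2.1.sum + st.2.2.sum

-- ===== PORT B =====
def solution_alt (n : Int) : Int :=
  let sq := (PySem.List.pyRange 0 n 1).foldl
    (fun (d : PySem.Dict Int Int) c => d.insert (c * c) c) PySem.Dict.empty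
  (PySem.List.pyRange 0 n 1).foldl (fun total a =>
    let a3 := a ^ 3
    (PySem.List.pyRange 0 n 1).foldl (fun total b =>
      match sq.get? (a3 + b * b) with
      | some c => total + (a + b + c)
      | none => total) total) 0

-- ===== PRECONDITION & SPEC =====
def Spec_solution (n : Int) (out : Int) : Prop := out = solution_alt n
instance (n : Int) (out : Int) : Decidable (Spec_solution n out) := by unfold Spec_solution; infer_instance

-- ===== CLAIM (what is proved, stated in full; the proofs are below) =====
def Claim_equal_solution : Prop := ∀ (n : Int), Dom_solution n → Spec_solution n (solution n)

-- ===== LEMMAS AND PROOFS =====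

-- sum of A's three accumulator lists
def pvSum3 (st : List Int × List Int × List Int) : Int := st.1.sum + st.2.1.sum + st.2.2.sum

-- generic: a fold whose step adds g x to pvSum3 of the state
theorem pvSum3_foldl (L : List Int) (F : (List Int × List Int × List Int) → Int → (List Int × List Int × List Int))
    (g : Int → Int) (hF : ∀ st x, pvSum3 (F st x) = pvSum3 st + g x) :
    ∀ st, pvSum3 (L.foldl F st) = pvSum3 st + (L.map g).sum := by
  induction L with
  | nil => intro st; simp
  | cons x L ih => intro st; simp [List.foldl_cons, ih, hF]; ring

theorem pvFoldl_add (L : List Int) (f : Int → Int) :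
    ∀ init : Int, (L.foldl (fun acc x => acc + f x) init) = init + (L.map f).sum := by
  induction L with
  | nil => intro init; simp
  | cons x L ih => intro init; simp [ih]; ring

-- the square dictionary built by B
def pvSq (n : Int) : PySem.Dict Int Int :=
  (PySem.List.pyRange 0 n 1).foldl (fun d c => d.insert (c * c) c) PySem.Dict.empty

theorem pvMapSq_nodup (n : Int) : ((PySem.List.pyRange 0 n 1).map (fun c => c * c)).Nodup := by
  apply List.Nodup.map_on _ (PySem.List.nodup_pyRange_one 0 n)
  intro x hx y hy hxy
  have hx0 : 0 ≤ x := ((PySem.List.mem_pyRange_one).mp hx).1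
  have hy0 : 0 ≤ y := ((PySem.List.mem_pyRange_one).mp hy).1
  nlinarith

theorem pvSq_items (n : Int) :
    (pvSq n).items = (PySem.List.pyRange 0 n 1).map (fun c => (c * c, c)) := by
  unfold pvSq
  rw [PySem.Dict.items_foldl_insert_fresh (k := fun c => c * c) (v := fun c => c)
        (d := PySem.Dict.empty) (l := PySem.List.pyRange 0 n 1)
        (by intro a _; simp [PySem.Dict.contains_empty]) (pvMapSq_nodup n)]
  simp [PySem.Dict.empty]

theorem pvSq_keys_nodup (n : Int) : (pvSq n).keys.Nodup := by
  have : (pvSq n).keys = (PySem.List.pyRange 0 n 1).map (fun c => c * c) := by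
    simp [PySem.Dict.keys, pvSq_items, List.map_map, Function.comp]
  rw [this]; exact pvMapSq_nodup n

theorem pvSq_get?_some (n t c : Int) :
    (pvSq n).get? t = some c ↔ (c ∈ PySem.List.pyRange 0 n 1 ∧ c * c = t) := by
  rw [PySem.Dict.get?_eq_some_iff_mem_items _ _ _ (pvSq_keys_nodup n), pvSq_items]
  constructor
  · intro h
    rcases List.mem_map.mp h with ⟨x, hx, hxe⟩
    obtain ⟨h1, h2⟩ := Prod.mk.injEq .. ▸ hxe
    exact ⟨h2 ▸ hx, by rw [h2] at h1; exact h1⟩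
  · intro ⟨h1, h2⟩
    exact List.mem_map.mpr ⟨c, h1, by simp [h2]⟩

theorem pvSq_get?_none (n t : Int) (h : (pvSq n).get? t = none) :
    ∀ x ∈ PySem.List.pyRange 0 n 1, x * x ≠ t := by
  intro x hx he
  rw [PySem.Dict.get?_eq_none_iff_not_mem_keys] at h
  apply h
  have : (pvSq n).keys = (PySem.List.pyRange 0 n 1).map (fun c => c * c) := by
    simp [PySem.Dict.keys, pvSq_items, List.map_map, Function.comp]
  rw [this]
  exact List.mem_map.mpr ⟨x, hx, he⟩

-- single-hit sum over a nodup list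
theorem pvSum_single (f : Int → Int) (c : Int) :
    ∀ l : List Int, l.Nodup → c ∈ l →
    (l.map (fun x => if x = c then f x else 0)).sum = f c := by
  intro l
  induction l with
  | nil => intro _ h; simp at h
  | cons y l ih =>
      intro hnd hm
      simp only [List.map_cons, List.sum_cons]
      rcases List.mem_cons.mp hm with h | h
      · have hz : (l.map (fun x => if x = c then f x else 0)).sum = 0 := by
          apply List.sum_eq_zero; intro z hz
          rcases List.mem_map.mp hz with ⟨x, hx, hxz⟩
          have hxc : x ≠ c := fun e => (List.nodup_cons.mp hnd).1 (h ▸ e ▸ hx)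
          simp [hxc] at hxz; omega
        rw [if_pos h.symm, hz, h]; ring
      · have hne : y ≠ c := fun e => (List.nodup_cons.mp hnd).1 (e ▸ h)
        rw [if_neg hne, ih (List.nodup_cons.mp hnd).2 h]; ring

-- the pointwise bridge: inner c-loop of A equals B's dictionary lookup
theorem pvPointwise (n t X : Int) :
    ((PySem.List.pyRange 0 n 1).map (fun c => if t == c * c then X + c else 0)).sum =
    (match (pvSq n).get? t with | some c => X + c | none => 0) := by
  cases hg : (pvSq n).get? t with
  | none =>
      simp only []
      apply List.sum_eq_zero
      intro z hz
      rcases List.mem_map.mp hz with ⟨x, hx, hxz⟩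
      have : t ≠ x * x := fun e => pvSq_get?_none n t hg x hx e.symm
      simpa [this] using hxz.symm
  | some c =>
      obtain ⟨hc, hct⟩ := (pvSq_get?_some n t c).mp hg
      have hc0 : 0 ≤ c := ((PySem.List.mem_pyRange_one).mp hc).1
      have hcong : ∀ x ∈ PySem.List.pyRange 0 n 1,
          (if t == x * x then X + x else 0) = (if x = c then X + x else 0) := by
        intro x hx
        have hx0 : 0 ≤ x := ((PySem.List.mem_pyRange_one).mp hx).1
        by_cases h : x = c
        · subst h; simp [hct.symm]
        · have : t ≠ x * x := by
            intro e; apply h; nlinarith [hct, e]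
          simp [this, h]
      rw [List.map_congr_left hcong]
      exact pvSum_single (fun x => X + x) c _ (PySem.List.nodup_pyRange_one 0 n) hc

-- ===== VERDICT (by name: the statement is the Claim_ definition above) =====
theorem solution_spec : Claim_equal_solution := by
  intro n _
  unfold Spec_solution solution solution_alt
  have hsq : ((PySem.List.pyRange 0 n 1).foldl
      (fun (d : PySem.Dict Int Int) c => d.insert (c * c) c) PySem.Dict.empty) = pvSq n := rfl
  rw [hsq]
  set R := PySem.List.pyRange 0 n 1 with hR
  -- A side: the triple fold sums to a triple mapped sum
  have hinner : ∀ (a b : Int) (st : List Int × List Int × List Int),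
      pvSum3 (R.foldl (fun st c =>
        if isTriplet a b c then (st.1 ++ [a], st.2.1 ++ [b], st.2.2 ++ [c]) else st) st) =
      pvSum3 st + (R.map (fun c => if isTriplet a b c then a + b + c else 0)).sum := by
    intro a b st
    refine pvSum3_foldl R _ _ ?_ st
    intro st c
    by_cases h : isTriplet a b c
    · simp [pvSum3, h]; ring
    · simp [pvSum3, h]
  have hmid : ∀ (a : Int) (st : List Int × List Int × List Int),
      pvSum3 (R.foldl (fun st b => R.foldl (fun st c =>
        if isTriplet a b c then (st.1 ++ [a], st.2.1 ++ [b], st.2.2 ++ [c]) else st) st) st) =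
      pvSum3 st + (R.map (fun b =>
        (R.map (fun c => if isTriplet a b c then a + b + c else 0)).sum)).sum := by
    intro a st
    exact pvSum3_foldl R _ _ (fun st b => hinner a b st) st
  have hA : (fun (st : List Int × List Int × List Int) => st.1.sum + st.2.1.sum + st.2.2.sum)
      (R.foldl (fun st a => R.foldl (fun st b => R.foldl (fun st c =>
        if isTriplet a b c then (st.1 ++ [a], st.2.1 ++ [b], st.2.2 ++ [c]) else st) st) st)
        ([], [], [])) =
      (R.map (fun a => (R.map (fun b =>
        (R.map (fun c => if isTriplet a b c then a + b + c else 0)).sum)).sum)).sum := by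
    have := pvSum3_foldl R _ _ (fun st a => hmid a st) ([], [], [])
    simpa [pvSum3] using this
  -- B side: the double fold is a double mapped sum
  have hBin : ∀ (a total : Int),
      (R.foldl (fun total b =>
        match (pvSq n).get? (a ^ 3 + b * b) with
        | some c => total + (a + b + c)
        | none => total) total) =
      total + (R.map (fun b =>
        match (pvSq n).get? (a ^ 3 + b * b) with
        | some c => a + b + c
        | none => 0)).sum := by
    intro a total
    have he : (fun (total b : Int) =>
        match (pvSq n).get? (a ^ 3 + b * b) with
        | some c => total + (a + b + c)
        | none => total) =
        (fun (total b : Int) => total + (match (pvSq n).get? (a ^ 3 + b * b) with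
        | some c => a + b + c
        | none => 0)) := by
      funext total b
      cases hg : (pvSq n).get? (a ^ 3 + b * b) <;> simp
    rw [he, pvFoldl_add]
  have hB : (R.foldl (fun total a =>
      R.foldl (fun total b =>
        match (pvSq n).get? (a ^ 3 + b * b) with
        | some c => total + (a + b + c)
        | none => total) total) 0) =
      (R.map (fun a => (R.map (fun b =>
        match (pvSq n).get? (a ^ 3 + b * b) with
        | some c => a + b + c
        | none => 0)).sum)).sum := by
    have he : (fun (total a : Int) => R.foldl (fun total b =>
        match (pvSq n).get? (a ^ 3 + b * b) with
        | some c => total + (a + b + c)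
        | none => total) total) =
        (fun (total a : Int) => total + (R.map (fun b =>
        match (pvSq n).get? (a ^ 3 + b * b) with
        | some c => a + b + c
        | none => 0)).sum) := by
      funext total a
      exact hBin a total
    rw [he, pvFoldl_add]
    simp
  simp only [hA, hB]
  -- pointwise: A's inner c-sum equals B's lookup
  congr 1
  apply List.map_congr_left
  intro a _
  congr 1
  apply List.map_congr_left
  intro b _
  have hfun : (fun c => if isTriplet a b c then a + b + c else 0) =
      (fun c => if (a ^ 3 + b ^ 2) == c * c then (a + b) + c else 0) := by
    funext c
    simp [isTriplet, pow_two, add_assoc]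
  rw [hfun, pvPointwise n (a ^ 3 + b ^ 2) (a + b)]
  have : a ^ 3 + b * b = a ^ 3 + b ^ 2 := by ring
  rw [this]
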